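-- pv_equiv track=rewrite | github.com/ali-mzhr/chi-task | CandyStore.py | candyStore
-- ===== SOURCE A (Python) =====
-- def candyStore(candies,N,K):
--     diff = N-K
--     candies.sort()
--     mx = 0
--     mn = 0
--     for n in range(diff):
--         mn += candies[n]
--     candies.sort(reverse=True)
--     for m in range(diff):
--         mx += candies[m]
--     return mn,mx
-- ===== SOURCE B (Python) =====
-- def _sum_smallest(xs, d):
--     # quickselect-style: accumulate the sum of the d smallest values without sorting
--     acc = 0
--     while d > 0 and xs:
--         p = xs[len(xs) // 2]
--         lt = [y for y in xs if y < p]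
--         if d <= len(lt):
--             xs = lt
--             continue
--         gt = [y for y in xs if y > p]
--         ceq = len(xs) - len(lt) - len(gt)
--         if d <= len(lt) + ceq:
--             return acc + sum(lt) + (d - len(lt)) * p
--         acc += sum(lt) + ceq * p
--         d -= len(lt) + ceq
--         xs = gt
--     return acc
--
--
-- def candyStore(candies, N, K):
--     d = N - K
--     mn = _sum_smallest(candies, d)
--     mx = -_sum_smallest([-y for y in candies], d)
--     return mn, mx
-- ===== Notes on version B (the rewrite author's own statement) =====
-- stated objective: alternative
-- what changed: replaces A's two full sorts plus index loops by a quickselect-style three-way-partition selection that accumulates the sum of the d smallest values directly (largest side obtained by negation), with no sorting at all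
import Mathlib
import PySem

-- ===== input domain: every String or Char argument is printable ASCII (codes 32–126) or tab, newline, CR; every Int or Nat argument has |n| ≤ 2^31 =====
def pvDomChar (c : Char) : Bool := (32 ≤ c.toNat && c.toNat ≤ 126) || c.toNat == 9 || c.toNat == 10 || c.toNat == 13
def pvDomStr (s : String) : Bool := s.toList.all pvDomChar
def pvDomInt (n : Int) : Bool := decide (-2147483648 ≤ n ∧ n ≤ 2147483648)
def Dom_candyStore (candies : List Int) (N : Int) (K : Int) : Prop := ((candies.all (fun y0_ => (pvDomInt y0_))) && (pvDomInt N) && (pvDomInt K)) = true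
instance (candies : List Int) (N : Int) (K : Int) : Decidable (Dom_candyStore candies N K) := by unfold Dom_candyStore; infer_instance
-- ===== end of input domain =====

-- B replaces A's two full sorts plus index loops by a quickselect-style three-way-partition
-- selection summing the N-K smallest values directly (largest side via negation).
-- NOTE: A sorts `candies` in place (the caller's list is left reverse-sorted); B does not
-- mutate its argument. The equivalence proved here is about the return value only.

-- ===== PORT A =====
def candyStore (candies : List Int) (N : Int) (K : Int) : Int × Int :=
  let diff := N - K
  let s := PySem.List.sorted candies (fun x => x) false
  let mn := (PySem.List.pyRange 0 diff 1).foldl (fun acc n => acc + PySem.List.pyGetD s n 0) 0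
  let s2 := PySem.List.sorted s (fun x => x) true
  let mx := (PySem.List.pyRange 0 diff 1).foldl (fun acc m => acc + PySem.List.pyGetD s2 m 0) 0
  (mn, mx)

-- ===== PORT B =====
-- termination helper lemmas for the quickselect loop (cited by decreasing_by)
theorem filter_len_lt {p : Int → Bool} {xs : List Int} (a : Int) (ha : a ∈ xs) (hpa : p a = false) :
    (xs.filter p).length < xs.length := by
  rcases List.mem_iff_append.mp ha with ⟨s, t, rfl⟩
  simp [List.filter_append, hpa]
  calc (s.filter p).length + (t.filter p).length
      ≤ s.length + t.length := Nat.add_le_add (List.length_filter_le _ _) (List.length_filter_le _ _)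
    _ < s.length + (t.length + 1) := by omega

theorem filter_attach_len_lt (xs : List Int) (f : Int → Bool) (a : Int) (ha : a ∈ xs) (hfa : f a = false) :
    (List.filter (fun (x : {y // y ∈ xs}) => f x.val) xs.attach).length < xs.length := by
  have h2 : List.countP (fun (x : {y // y ∈ xs}) => f x.val) xs.attach = List.countP f xs :=
    List.countP_attach
  rw [← List.countP_eq_length_filter, h2, List.countP_eq_length_filter]
  exact filter_len_lt a ha hfa

-- faithful port of _sum_smallest from Source B (the while loop becomes recursion on the list)
def sumSmallest (xs : List Int) (d : Int) (acc : Int) : Int :=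
  if h : 0 < d ∧ xs ≠ [] then
    let p := xs.getD (xs.length / 2) 0
    let lt := xs.filter (fun y => y < p)
    if d ≤ (lt.length : Int) then
      sumSmallest lt d acc
    else
      let gt := xs.filter (fun y => p < y)
      let ceq : Int := (xs.length : Int) - lt.length - gt.length
      if d ≤ (lt.length : Int) + ceq then
        acc + lt.sum + (d - lt.length) * p
      else
        sumSmallest gt (d - lt.length - ceq) (acc + lt.sum + ceq * p)
  else acc
termination_by xs.length
decreasing_by
  all_goals
    have hlen : xs.length / 2 < xs.length := Nat.div_lt_self (List.length_pos_of_ne_nil h.2) (by omega)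
    have hp : xs[xs.length / 2]?.getD 0 ∈ xs := by
      rw [List.getElem?_eq_getElem hlen]; exact List.getElem_mem hlen
    simp
  · exact filter_attach_len_lt xs (fun y => decide (y < xs[xs.length / 2]?.getD 0)) _ hp (by simp)
  · exact filter_attach_len_lt xs (fun y => decide (xs[xs.length / 2]?.getD 0 < y)) _ hp (by simp)

def candyStore_alt (candies : List Int) (N : Int) (K : Int) : Int × Int :=
  let d := N - K
  let mn := sumSmallest candies d 0
  let mx := -(sumSmallest (candies.map (fun y => -y)) d 0)
  (mn, mx)

-- ===== PRECONDITION & SPEC =====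
-- A indexes candies[n] for n in range(N-K); it raises IndexError iff N-K > len(candies).
def Pre_candyStore (candies : List Int) (N : Int) (K : Int) : Prop :=
  N - K ≤ (candies.length : Int)
instance (candies : List Int) (N : Int) (K : Int) : Decidable (Pre_candyStore candies N K) := by
  unfold Pre_candyStore; infer_instance

def pvWitness_candyStore : List Int × Int × Int := ([4, 1, 3, 2, 5], 5, 3)

def Spec_candyStore (candies : List Int) (N : Int) (K : Int) (out : Int × Int) : Prop := out = candyStore_alt candies N K
instance (candies : List Int) (N : Int) (K : Int) (out : Int × Int) : Decidable (Spec_candyStore candies N K out) := by unfold Spec_candyStore; infer_instance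

-- ===== CLAIM (what is proved, stated in full; the proofs are below) =====
def Claim_equal_candyStore : Prop := ∀ (candies : List Int) (N : Int) (K : Int), Dom_candyStore candies N K → Pre_candyStore candies N K → Spec_candyStore candies N K (candyStore candies N K)

-- ===== LEMMAS AND PROOFS =====

-- the three-way partition of a list by a pivot is a permutation of the list
theorem perm_parts (xs : List Int) (p : Int) :
    (xs.filter (fun y => decide (y < p)) ++ xs.filter (fun y => decide (y = p)) ++
      xs.filter (fun y => decide (p < y))).Perm xs := by
  have h1 := List.filter_append_perm (fun y => decide (y < p)) xs
  have h2 := List.filter_append_perm (fun y => decide (y = p)) (xs.filter (fun y => !decide (y < p)))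
  rw [List.filter_filter, List.filter_filter] at h2
  have e1 : xs.filter (fun y => decide (y = p) && !decide (y < p)) = xs.filter (fun y => decide (y = p)) := by
    apply List.filter_congr; intro y _
    by_cases h : y = p
    · simp [h]
    · simp [h]
  have e2 : xs.filter (fun y => !decide (y = p) && !decide (y < p)) = xs.filter (fun y => decide (p < y)) := by
    apply List.filter_congr; intro y _
    by_cases ha : y = p
    · simp [ha]
    · by_cases hb : y < p <;> simp [ha, hb] <;> omega
  rw [e1, e2] at h2
  rw [List.append_assoc]
  exact (List.Perm.append_left _ h2).trans h1

-- sorting a list splits along a pivot into sorted(below) ++ copies of the pivot ++ sorted(above)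
theorem sorted_split (xs : List Int) (p : Int) :
    PySem.List.sorted xs (fun x => x) false =
      PySem.List.sorted (xs.filter (fun y => decide (y < p))) (fun x => x) false ++
      List.replicate (xs.filter (fun y => decide (y = p))).length p ++
      PySem.List.sorted (xs.filter (fun y => decide (p < y))) (fun x => x) false := by
  have hE : xs.filter (fun y => decide (y = p)) =
      List.replicate (xs.filter (fun y => decide (y = p))).length p :=
    List.eq_replicate_of_mem (by intro b hb; exact of_decide_eq_true (List.mem_filter.mp hb).2)
  apply PySem.List.sorted_id_eq_of_perm_of_pairwise
  · refine List.Perm.trans ?_ (perm_parts xs p)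
    refine List.Perm.append (List.Perm.append ?_ ?_) ?_
    · exact PySem.List.sorted_perm _ _ _
    · rw [← hE]
    · exact PySem.List.sorted_perm _ _ _
  · rw [List.pairwise_append, List.pairwise_append]
    refine ⟨⟨PySem.List.sorted_pairwise _ _, List.pairwise_replicate_of_refl, ?_⟩,
            PySem.List.sorted_pairwise _ _, ?_⟩
    · intro a ha b hb
      have ha' : a < p := of_decide_eq_true (List.mem_filter.mp ((PySem.List.mem_sorted _ _ _ _).mp ha)).2
      have hb' : b = p := List.eq_of_mem_replicate hb
      omega
    · intro a ha b hb
      have hb' : p < b := of_decide_eq_true (List.mem_filter.mp ((PySem.List.mem_sorted _ _ _ _).mp hb)).2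
      rcases List.mem_append.mp ha with h | h
      · have : a < p := of_decide_eq_true (List.mem_filter.mp ((PySem.List.mem_sorted _ _ _ _).mp h)).2
        omega
      · have : a = p := List.eq_of_mem_replicate h
        omega

theorem sorted_nil_id : PySem.List.sorted ([] : List Int) (fun x => x) false = [] := rfl

theorem sum_map_neg (l : List Int) : (l.map (fun y => -y)).sum = -l.sum := by
  induction l with
  | nil => simp
  | cons x t ih => simp [ih]; ring

theorem sorted_asc_perm (s t : List Int) (h : s.Perm t) :
    PySem.List.sorted s (fun x => x) false = PySem.List.sorted t (fun x => x) false := by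
  apply PySem.List.sorted_id_eq_of_perm_of_pairwise
  · exact (PySem.List.sorted_perm t (fun x => x) false).trans h.symm
  · exact PySem.List.sorted_pairwise _ _

theorem sorted_neg (xs : List Int) :
    PySem.List.sorted (xs.map (fun y => -y)) (fun x => x) false =
      (PySem.List.sorted xs (fun x => x) true).map (fun y => -y) := by
  apply PySem.List.sorted_id_eq_of_perm_of_pairwise
  · exact (PySem.List.sorted_perm xs (fun x => x) true).map (fun y => -y)
  · rw [List.pairwise_map]
    exact (PySem.List.sorted_pairwise_rev xs (fun x => x)).imp (fun h => by omega)

theorem sorted_desc_eq (xs : List Int) :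
    PySem.List.sorted xs (fun x => x) true =
      (PySem.List.sorted (xs.map (fun y => -y)) (fun x => x) false).map (fun y => -y) := by
  rw [sorted_neg, List.map_map]
  simp

-- A's index loop over range(k) sums the first k elements
theorem loop_sum (s : List Int) : ∀ (k : Nat), k ≤ s.length →
    (PySem.List.pyRange 0 (k : Int) 1).foldl (fun acc n => acc + PySem.List.pyGetD s n 0) 0 =
      (s.take k).sum := by
  intro k
  induction k with
  | zero => intro _; rw [PySem.List.pyRange_one_eq_nil (by simp)]; simp
  | succ k ih =>
    intro hk
    have hk' : k ≤ s.length := Nat.le_of_succ_le hk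
    have hklt : k < s.length := hk
    have hcast : ((k + 1 : Nat) : Int) = (k : Int) + 1 := by push_cast; ring
    rw [hcast, PySem.List.pyRange_one_succ_right (by positivity), List.foldl_append, ih hk']
    simp only [List.foldl_cons, List.foldl_nil, PySem.List.pyGetD_natCast]
    rw [List.take_succ, List.sum_append, List.getElem?_eq_getElem hklt,
      List.getD_eq_getElem?_getD, List.getElem?_eq_getElem hklt]
    simp

-- A's loop at an arbitrary integer bound d ≤ len(s)
theorem loop_sum_int (s : List Int) (d : Int) (hd : d ≤ (s.length : Int)) :
    (PySem.List.pyRange 0 d 1).foldl (fun acc n => acc + PySem.List.pyGetD s n 0) 0 =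
      (s.take d.toNat).sum := by
  by_cases h : d ≤ 0
  · rw [PySem.List.pyRange_one_eq_nil h]
    have : d.toNat = 0 := by omega
    simp [this]
  · have : d = (d.toNat : Int) := by omega
    rw [this]
    exact loop_sum s d.toNat (by omega)

-- the quickselect accumulates acc + (sum of the d smallest values)
theorem ss_spec_aux : ∀ (n : Nat) (xs : List Int), xs.length ≤ n → ∀ (d acc : Int),
    d ≤ (xs.length : Int) →
    sumSmallest xs d acc = acc + ((PySem.List.sorted xs (fun x => x) false).take d.toNat).sum := by
  intro n
  induction n with
  | zero =>
    intro xs hxs d acc _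
    have hnil : xs = [] := List.eq_nil_of_length_eq_zero (Nat.le_zero.mp hxs)
    subst hnil
    rw [sumSmallest]
    simp [sorted_nil_id]
  | succ n ih =>
    intro xs hxs d acc hd
    rw [sumSmallest]
    by_cases h : 0 < d ∧ xs ≠ []
    case neg =>
      rw [dif_neg h]
      push_neg at h
      by_cases hd0 : d ≤ 0
      · have : d.toNat = 0 := by omega
        simp [this]
      · have hnil : xs = [] := h (by omega)
        subst hnil
        simp [sorted_nil_id]
    case pos =>
      rw [dif_pos h]
      set p := xs.getD (xs.length / 2) 0 with hp
      show (if d ≤ ((xs.filter (fun y => decide (y < p))).length : Int) then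
              sumSmallest (xs.filter (fun y => decide (y < p))) d acc
            else if d ≤ ((xs.filter (fun y => decide (y < p))).length : Int) +
                ((xs.length : Int) - (xs.filter (fun y => decide (y < p))).length -
                  (xs.filter (fun y => decide (p < y))).length) then
              acc + (xs.filter (fun y => decide (y < p))).sum +
                (d - (xs.filter (fun y => decide (y < p))).length) * p
            else
              sumSmallest (xs.filter (fun y => decide (p < y)))
                (d - (xs.filter (fun y => decide (y < p))).length -
                  ((xs.length : Int) - (xs.filter (fun y => decide (y < p))).length -
                    (xs.filter (fun y => decide (p < y))).length))
                (acc + (xs.filter (fun y => decide (y < p))).sum +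
                  ((xs.length : Int) - (xs.filter (fun y => decide (y < p))).length -
                    (xs.filter (fun y => decide (p < y))).length) * p))
          = acc + ((PySem.List.sorted xs (fun x => x) false).take d.toNat).sum
      set L := xs.filter (fun y => decide (y < p)) with hLdef
      set E := xs.filter (fun y => decide (y = p)) with hEdef
      set G := xs.filter (fun y => decide (p < y)) with hGdef
      have hlen2 : xs.length / 2 < xs.length :=
        Nat.div_lt_self (List.length_pos_of_ne_nil h.2) one_lt_two
      have hpmem : p ∈ xs := by
        rw [hp, List.getD_eq_getElem _ _ hlen2]; exact List.getElem_mem hlen2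
      have hLlt : L.length < xs.length := by
        rw [hLdef]; exact filter_len_lt p hpmem (by simp)
      have hGlt : G.length < xs.length := by
        rw [hGdef]; exact filter_len_lt p hpmem (by simp)
      have hperm : (L ++ E ++ G).Perm xs := by
        rw [hLdef, hEdef, hGdef]; exact perm_parts xs p
      have hlen : L.length + E.length + G.length = xs.length := by
        have := hperm.length_eq; simp [List.length_append] at this; omega
      have hsplit : PySem.List.sorted xs (fun x => x) false =
          PySem.List.sorted L (fun x => x) false ++ List.replicate E.length p ++
          PySem.List.sorted G (fun x => x) false := by
        rw [hLdef, hEdef, hGdef]; exact sorted_split xs p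
      have hLs : (PySem.List.sorted L (fun x => x) false).length = L.length :=
        PySem.List.length_sorted _ _ _
      split_ifs with h1 h2
      · -- d ≤ len(lt): recurse on the strictly-below part
        rw [ih L (by omega) d acc h1, hsplit, List.append_assoc,
          List.take_append_of_le_length (by rw [hLs]; omega)]
      · -- the pivot block covers position d: closed-form answer
        rw [hsplit, List.append_assoc, List.take_append, List.take_of_length_le (by rw [hLs]; omega),
          List.take_append, List.take_replicate, hLs]
        have hm : min (d.toNat - L.length) E.length = d.toNat - L.length := by omega
        have hz : d.toNat - L.length - (List.replicate E.length p).length = 0 := by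
          rw [List.length_replicate]; omega
        rw [hm, hz, List.take_zero, List.sum_append, List.sum_append, List.sum_replicate_int,
          List.sum_nil, (PySem.List.sorted_perm L (fun x => x) false).sum_eq]
        have hc : ((d.toNat - L.length : Nat) : Int) = d - (L.length : Int) := by omega
        rw [hc]; ring
      · -- beyond the pivot block: recurse on the strictly-above part
        have hc : ((xs.length : Int) - (L.length : Int) - (G.length : Int)) = (E.length : Int) := by
          omega
        rw [hc]
        rw [ih G (by omega) (d - (L.length : Int) - (E.length : Int))
            (acc + L.sum + (E.length : Int) * p) (by omega)]
        rw [hsplit, List.append_assoc, List.take_append,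
          List.take_of_length_le (i := d.toNat) (l := (PySem.List.sorted L fun x => x))
            (by rw [hLs]; omega),
          List.take_append, List.take_replicate, hLs]
        have hm : min (d.toNat - L.length) E.length = E.length := by omega
        have hd' : (d - (L.length : Int) - (E.length : Int)).toNat =
            d.toNat - L.length - (List.replicate E.length p).length := by
          rw [List.length_replicate]; omega
        rw [hm, hd', List.sum_append, List.sum_append, List.sum_replicate_int,
          (PySem.List.sorted_perm L (fun x => x) false).sum_eq]
        ring

-- public form of the invariant
theorem sumSmallest_spec (xs : List Int) (d acc : Int) (hd : d ≤ (xs.length : Int)) :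
    sumSmallest xs d acc = acc + ((PySem.List.sorted xs (fun x => x) false).take d.toNat).sum :=
  ss_spec_aux xs.length xs le_rfl d acc hd

-- ===== VERDICT (by name: the statement is the Claim_ definition above) =====
theorem candyStore_spec : Claim_equal_candyStore := by
  intro candies N K _ hpre
  unfold Pre_candyStore at hpre
  unfold Spec_candyStore candyStore candyStore_alt
  have hsl : (PySem.List.sorted candies (fun x => x) false).length = candies.length :=
    PySem.List.length_sorted _ _ _
  have hsl2 : (PySem.List.sorted (PySem.List.sorted candies (fun x => x) false)
      (fun x => x) true).length = candies.length := by
    rw [PySem.List.length_sorted, hsl]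
  have hs2 : PySem.List.sorted (PySem.List.sorted candies (fun x => x) false) (fun x => x) true =
      PySem.List.sorted candies (fun x => x) true := by
    rw [sorted_desc_eq, sorted_desc_eq candies]
    congr 1
    exact sorted_asc_perm _ _ ((PySem.List.sorted_perm candies (fun x => x) false).map _)
  show ((PySem.List.pyRange 0 (N - K) 1).foldl
          (fun acc n => acc + PySem.List.pyGetD (PySem.List.sorted candies (fun x => x) false) n 0) 0,
        (PySem.List.pyRange 0 (N - K) 1).foldl
          (fun acc m => acc + PySem.List.pyGetD
            (PySem.List.sorted (PySem.List.sorted candies (fun x => x) false) (fun x => x) true) m 0) 0)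
      = (sumSmallest candies (N - K) 0, -(sumSmallest (candies.map (fun y => -y)) (N - K) 0))
  rw [loop_sum_int _ _ (by rw [hsl]; exact hpre), loop_sum_int _ _ (by rw [hsl2]; exact hpre)]
  rw [sumSmallest_spec candies _ _ hpre,
    sumSmallest_spec _ _ _ (by simpa using hpre)]
  rw [hs2, sorted_neg, ← List.map_take, sum_map_neg]
  simp
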